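-- pv_equiv track=rewrite | github.com/Dysk1ddy/swordcoast | dnd_game/ui/kivy_markup.py | visible_markup_text
-- ===== SOURCE A (Python) =====
-- KIVY_VISIBLE_ENTITIES = {
--     "&amp;": "&",
--     "&bl;": "[",
--     "&br;": "]",
-- }
--
-- def visible_markup_text(markup: str) -> str:
--     output: list[str] = []
--     position = 0
--     while position < len(markup):
--         if markup[position] == "[":
--             end = markup.find("]", position)
--             if end != -1:
--                 position = end + 1
--                 continue
--         if markup[position] == "&":
--             end = markup.find(";", position)
--             if end != -1:
--                 entity = markup[position : end + 1]
--                 output.append(KIVY_VISIBLE_ENTITIES.get(entity, "?"))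
--                 position = end + 1
--                 continue
--         output.append(markup[position])
--         position += 1
--     return "".join(output)
-- ===== SOURCE B (Python) =====
-- KIVY_VISIBLE_ENTITIES = {
--     "&amp;": "&",
--     "&bl;": "[",
--     "&br;": "]",
-- }
--
-- def _dists(s, ch):
--     # res[i] = distance from i to the first ch at index >= i, or -1 if none (len(res) == len(s)+1)
--     res = [-1]
--     d = -1
--     for c in reversed(s):
--         if c == ch:
--             d = 0
--         elif d != -1:
--             d += 1
--         res.append(d)
--     res.reverse()
--     return res
--
-- def visible_markup_text(markup: str) -> str:
--     db = _dists(markup, "]")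
--     ds = _dists(markup, ";")
--     out = []
--     i = 0
--     n = len(markup)
--     while i < n:
--         c = markup[i]
--         if c == "[" and db[i] != -1:
--             i += db[i] + 1
--         elif c == "&" and ds[i] != -1:
--             d = ds[i]
--             out.append(KIVY_VISIBLE_ENTITIES.get(markup[i : i + d + 1], "?"))
--             i += d + 1
--         else:
--             out.append(c)
--             i += 1
--     return "".join(out)
-- ===== Notes on version B (the rewrite author's own statement) =====
-- stated objective: alternative
-- what changed: Replaces A's repeated str.find scans from each tag or entity start position with two next-delimiter distance tables built in one reverse pass, so the forward pass uses table lookups instead of rescanning.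
import Mathlib
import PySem

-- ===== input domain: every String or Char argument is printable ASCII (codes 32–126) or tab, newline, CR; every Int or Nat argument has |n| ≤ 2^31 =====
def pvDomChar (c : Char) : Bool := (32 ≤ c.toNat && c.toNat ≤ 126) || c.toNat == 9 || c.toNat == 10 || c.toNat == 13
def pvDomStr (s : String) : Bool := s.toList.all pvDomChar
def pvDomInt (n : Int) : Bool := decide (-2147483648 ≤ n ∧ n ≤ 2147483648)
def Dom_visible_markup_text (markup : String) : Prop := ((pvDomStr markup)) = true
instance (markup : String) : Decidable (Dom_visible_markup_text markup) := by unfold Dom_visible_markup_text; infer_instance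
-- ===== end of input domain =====

-- B: instead of A's repeated str.find scans, precompute next-delimiter distance tables in one
-- reverse pass and look them up during the forward pass (a different algorithm, same results).

-- ===== PORT A =====
-- the entity table (identical literal in Source A and Source B; shared by both ports)
def pvKivy : PySem.Dict (List Char) (List Char) :=
  PySem.Dict.ofList
    [ (['&','a','m','p',';'], ['&'])
    , (['&','b','l',';'], ['['])
    , (['&','b','r',';'], [']']) ]

def pvGoA (cs : List Char) (pos : Nat) : List Char :=
  if h : pos < cs.length then
    if hc1 : cs[pos] = '[' ∧ PySem.Chars.findFrom cs [']'] (pos : Int) ≠ -1 then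
      pvGoA cs ((PySem.Chars.findFrom cs [']'] (pos : Int)).toNat + 1)
    else if hc2 : cs[pos] = '&' ∧ PySem.Chars.findFrom cs [';'] (pos : Int) ≠ -1 then
      PySem.Dict.getD pvKivy
          (PySem.List.slice cs (some (pos : Int)) (some (PySem.Chars.findFrom cs [';'] (pos : Int) + 1))) ['?']
        ++ pvGoA cs ((PySem.Chars.findFrom cs [';'] (pos : Int)).toNat + 1)
    else cs[pos] :: pvGoA cs (pos + 1)
  else []
termination_by cs.length - pos
decreasing_by
  · have hs := PySem.Chars.findFrom_natCast_spec cs [']'] pos (Nat.le_of_lt h) hc1.2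
    omega
  · have hs := PySem.Chars.findFrom_natCast_spec cs [';'] pos (Nat.le_of_lt h) hc2.2
    omega
  · omega

def visible_markup_text (markup : String) : String :=
  String.ofList (pvGoA markup.toList 0)

-- ===== PORT B =====
-- reverse pass: pvDists cs ch has length cs.length+1; entry i is the distance from i to the
-- first occurrence of ch at index ≥ i, or -1 if there is none
def pvDists (cs : List Char) (ch : Char) : List Int :=
  match cs with
  | [] => [-1]
  | x :: xs =>
    let r := pvDists xs ch
    (if x = ch then 0 else if r.headD (-1) = -1 then -1 else r.headD (-1) + 1) :: r

def pvGoB (cs : List Char) (db ds : List Int) (pos : Nat) : List Char :=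
  if h : pos < cs.length then
    if cs[pos] = '[' ∧ db.getD pos (-1) ≠ -1 then
      pvGoB cs db ds (pos + (db.getD pos (-1)).toNat + 1)
    else if cs[pos] = '&' ∧ ds.getD pos (-1) ≠ -1 then
      PySem.Dict.getD pvKivy
          (PySem.List.slice cs (some (pos : Int)) (some ((pos : Int) + ds.getD pos (-1) + 1))) ['?']
        ++ pvGoB cs db ds (pos + (ds.getD pos (-1)).toNat + 1)
    else cs[pos] :: pvGoB cs db ds (pos + 1)
  else []
termination_by cs.length - pos
decreasing_by all_goals omega

def visible_markup_text_alt (markup : String) : String :=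
  String.ofList (pvGoB markup.toList (pvDists markup.toList ']') (pvDists markup.toList ';') 0)

-- ===== PRECONDITION & SPEC =====
def Spec_visible_markup_text (markup : String) (out : String) : Prop := out = visible_markup_text_alt markup
instance (markup : String) (out : String) : Decidable (Spec_visible_markup_text markup out) := by unfold Spec_visible_markup_text; infer_instance

-- ===== CLAIM (what is proved, stated in full; the proofs are below) =====
def Claim_equal_visible_markup_text : Prop := ∀ (markup : String), Dom_visible_markup_text markup → Spec_visible_markup_text markup (visible_markup_text markup)

-- ===== LEMMAS AND PROOFS =====

-- single-character find, cons step
theorem pv_find_cons (x : Char) (xs : List Char) (c : Char) :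
    PySem.Chars.find (x :: xs) [c] =
      if x = c then 0
      else if PySem.Chars.find xs [c] = -1 then -1 else PySem.Chars.find xs [c] + 1 := by
  by_cases hx : x = c
  · subst hx
    rw [if_pos rfl]
    have hinf : [x] <:+: x :: xs := (List.prefix_iff_eq_take.mpr (by simp)).isInfix
    have h0 : 0 ≤ PySem.Chars.find (x :: xs) [x] :=
      (PySem.Chars.find_nonneg_iff _ _).mpr hinf
    have hs := PySem.Chars.find_spec h0
    by_contra hne
    have hpos : 0 < (PySem.Chars.find (x :: xs) [x]).toNat := by omega
    have := hs.2 0 hpos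
    simp at this
  · rw [if_neg hx]
    have hpre0 : ¬ [c] <+: x :: xs := by
      intro hp
      rcases List.cons_prefix_cons.mp hp with ⟨h1, _⟩
      exact hx h1.symm
    by_cases hf : PySem.Chars.find xs [c] = -1
    · rw [if_pos hf]
      rw [PySem.Chars.find_eq_neg_one_iff] at hf ⊢
      intro hinf
      rcases (List.infix_cons_iff).mp hinf with h | h
      · exact hpre0 h
      · exact hf h
    · rw [if_neg hf]
      have hf0 : 0 ≤ PySem.Chars.find xs [c] := by
        have := PySem.Chars.neg_one_le_find xs [c]; omega
      have hsx := PySem.Chars.find_spec hf0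
      have hinfxs : [c] <:+: xs := hsx.1.isInfix.trans (List.drop_suffix _ _).isInfix
      have hg0 : 0 ≤ PySem.Chars.find (x :: xs) [c] :=
        (PySem.Chars.find_nonneg_iff _ _).mpr (List.infix_cons_iff.mpr (Or.inr hinfxs))
      have hsg := PySem.Chars.find_spec hg0
      have hgt : (PySem.Chars.find (x :: xs) [c]).toNat ≠ 0 := by
        intro h0
        rw [h0] at hsg
        exact hpre0 hsg.1
      obtain ⟨k, hk⟩ : ∃ k, (PySem.Chars.find (x :: xs) [c]).toNat = k + 1 :=
        ⟨_, (Nat.succ_pred_eq_of_pos (Nat.pos_of_ne_zero hgt)).symm⟩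
      rw [hk] at hsg
      have hk1 : [c] <+: xs.drop k := by
        have := hsg.1
        rwa [List.drop_succ_cons] at this
      -- k is ≥ the minimal index of xs, and minimal among cons indices
      have hle1 : (PySem.Chars.find xs [c]).toNat ≤ k := by
        by_contra hlt
        exact (hsx.2 k (by omega)) hk1
      have hle2 : k ≤ (PySem.Chars.find xs [c]).toNat := by
        by_contra hlt
        have := hsg.2 ((PySem.Chars.find xs [c]).toNat + 1) (by omega)
        rw [List.drop_succ_cons] at this
        exact this hsx.1
      omega

theorem pv_dists_length (cs : List Char) (ch : Char) : (pvDists cs ch).length = cs.length + 1 := by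
  induction cs with
  | nil => simp [pvDists]
  | cons x xs ih => simp [pvDists, ih]

theorem pv_dists_getD (cs : List Char) (ch : Char) (j : Nat) (hj : j ≤ cs.length) :
    (pvDists cs ch).getD j (-1) = PySem.Chars.find (cs.drop j) [ch] := by
  induction cs generalizing j with
  | nil =>
    have hj0 : j = 0 := by simpa using hj
    subst hj0
    have h : ¬ [ch] <:+: ([] : List Char) := by simp
    rw [← PySem.Chars.find_eq_neg_one_iff] at h
    simpa [pvDists] using h.symm
  | cons x xs ih =>
    match j with
    | 0 =>
      have hhead : (pvDists xs ch).headD (-1) = PySem.Chars.find xs [ch] := by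
        have h0 := ih 0 (Nat.zero_le _)
        have hlen := pv_dists_length xs ch
        have hlen0 : pvDists xs ch ≠ [] := by
          intro hnil; rw [hnil] at hlen; simp at hlen
        rw [List.headD_eq_head?_getD, List.head?_eq_getElem?]
        rw [List.getD] at h0
        simpa using h0
      simp only [pvDists, List.getD_cons_zero, List.drop_zero, pv_find_cons x xs ch, hhead]
    | j' + 1 =>
      have hj' : j' ≤ xs.length := by simpa using hj
      simp only [pvDists, List.getD_cons_succ, List.drop_succ_cons]
      exact ih j' hj'

theorem pv_goAB (cs : List Char) (pos : Nat) :
    pvGoA cs pos = pvGoB cs (pvDists cs ']') (pvDists cs ';') pos := by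
  suffices H : ∀ k pos, cs.length - pos ≤ k → pvGoA cs pos = pvGoB cs (pvDists cs ']') (pvDists cs ';') pos from
    H (cs.length - pos) pos le_rfl
  intro k
  induction k with
  | zero =>
    intro pos hk
    have h : ¬ pos < cs.length := by omega
    rw [pvGoA, pvGoB, dif_neg h, dif_neg h]
  | succ k ih =>
    intro pos hk
    by_cases h : pos < cs.length
    · have hposle := Nat.le_of_lt h
      have hdb := pv_dists_getD cs ']' pos hposle
      have hds := pv_dists_getD cs ';' pos hposle
      have hFFb := PySem.Chars.findFrom_natCast cs [']'] pos hposle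
      have hFFs := PySem.Chars.findFrom_natCast cs [';'] pos hposle
      have hble := PySem.Chars.neg_one_le_find (cs.drop pos) [']']
      have hsle := PySem.Chars.neg_one_le_find (cs.drop pos) [';']
      rw [pvGoA, pvGoB, dif_pos h, dif_pos h]
      by_cases hcb : cs[pos] = '[' ∧ PySem.Chars.find (cs.drop pos) [']'] ≠ -1
      · -- jump over a [..] tag
        have hA1 : PySem.Chars.findFrom cs [']'] (pos : Int)
            = (pos : Int) + PySem.Chars.find (cs.drop pos) [']'] := by rw [hFFb, if_neg hcb.2]
        have hA1ne : PySem.Chars.findFrom cs [']'] (pos : Int) ≠ -1 := by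
          rw [hA1]; omega
        have hB1ne : (pvDists cs ']').getD pos (-1) ≠ -1 := by rw [hdb]; exact hcb.2
        rw [dif_pos ⟨hcb.1, hA1ne⟩, if_pos ⟨hcb.1, hB1ne⟩]
        have hidx : (PySem.Chars.findFrom cs [']'] (pos : Int)).toNat + 1
            = pos + ((pvDists cs ']').getD pos (-1)).toNat + 1 := by
          rw [hA1, hdb]
          have := hcb.2
          omega
        rw [hidx, ih (pos + ((pvDists cs ']').getD pos (-1)).toNat + 1) (by omega)]
      · -- first condition false on both sides
        have nc1A : ¬ (cs[pos] = '[' ∧ PySem.Chars.findFrom cs [']'] (pos : Int) ≠ -1) := by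
          intro hc
          apply hcb
          refine ⟨hc.1, fun hf => hc.2 ?_⟩
          rw [hFFb, if_pos hf]
        have nc1B : ¬ (cs[pos] = '[' ∧ (pvDists cs ']').getD pos (-1) ≠ -1) := by
          intro hc
          exact hcb ⟨hc.1, by rw [← hdb]; exact hc.2⟩
        rw [dif_neg nc1A, if_neg nc1B]
        by_cases hcs : cs[pos] = '&' ∧ PySem.Chars.find (cs.drop pos) [';'] ≠ -1
        · -- decode an &..; entity
          have hA2 : PySem.Chars.findFrom cs [';'] (pos : Int)
              = (pos : Int) + PySem.Chars.find (cs.drop pos) [';'] := by rw [hFFs, if_neg hcs.2]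
          have hA2ne : PySem.Chars.findFrom cs [';'] (pos : Int) ≠ -1 := by
            rw [hA2]; omega
          have hB2ne : (pvDists cs ';').getD pos (-1) ≠ -1 := by rw [hds]; exact hcs.2
          rw [dif_pos ⟨hcs.1, hA2ne⟩, if_pos ⟨hcs.1, hB2ne⟩]
          have hslice : PySem.Chars.findFrom cs [';'] (pos : Int) + 1
              = (pos : Int) + (pvDists cs ';').getD pos (-1) + 1 := by rw [hA2, hds]
          have hidx : (PySem.Chars.findFrom cs [';'] (pos : Int)).toNat + 1
              = pos + ((pvDists cs ';').getD pos (-1)).toNat + 1 := by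
            rw [hA2, hds]
            have := hcs.2
            omega
          rw [hslice, hidx, ih (pos + ((pvDists cs ';').getD pos (-1)).toNat + 1) (by omega)]
        · -- plain character
          have nc2A : ¬ (cs[pos] = '&' ∧ PySem.Chars.findFrom cs [';'] (pos : Int) ≠ -1) := by
            intro hc
            apply hcs
            refine ⟨hc.1, fun hf => hc.2 ?_⟩
            rw [hFFs, if_pos hf]
          have nc2B : ¬ (cs[pos] = '&' ∧ (pvDists cs ';').getD pos (-1) ≠ -1) := by
            intro hc
            exact hcs ⟨hc.1, by rw [← hds]; exact hc.2⟩
          rw [dif_neg nc2A, if_neg nc2B, ih (pos + 1) (by omega)]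
    · rw [pvGoA, pvGoB, dif_neg h, dif_neg h]

-- ===== VERDICT (by name: the statement is the Claim_ definition above) =====
theorem visible_markup_text_spec : Claim_equal_visible_markup_text := by
  intro markup _
  unfold Spec_visible_markup_text visible_markup_text visible_markup_text_alt
  exact congrArg String.ofList (pv_goAB markup.toList 0)
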